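-- pv_equiv track=rewrite | github.com/thumbe12856/competitive-programming | cf/AND Sequences/solve.py | solve
-- ===== SOURCE A (Python) =====
-- from collections import defaultdict
--
-- MOD = 10 ** 9 + 7
--
-- def npr(n, r):
--     res = 1
--     for i in range(n, (n - r), -1):
--         res = (res * i) % MOD
--     return res
--
-- def solve(N, A):
--     ans = 0
--     ca = defaultdict(int)
--     min_val = float('inf')
--     for a in A:
--         ca[a] += 1
--         min_val = min(min_val, a)
--
--     if ca[min_val] < 2:
--         return 0
--
--     if min_val != 0:
--         target = format(min_val, '030b')
--         for n in ca:
--             if n == min_val: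
--                 continue
--
--             curr = format(n, '030b')
--             for i in range(30):
--                 if target[i] == "1" and curr[i] == "0":
--                     return 0
--
--     ans = npr(ca[min_val], 2)
--     for i in range(2, N - 2 + 1, 1):
--         ans = (ans * i) % MOD
--
--     return ans
-- ===== SOURCE B (Python) =====
-- MOD = 10 ** 9 + 7
--
-- def solve(N, A):
--     if not A:
--         return 0
--     m = min(A)
--     c = A.count(m)
--     if c < 2:
--         return 0
--     total = A[0]
--     for a in A[1:]:
--         total &= a
--     if total != m:
--         return 0
--     ans = (c * (c - 1)) % MOD
--     for i in range(2, N - 1):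
--         ans = (ans * i) % MOD
--     return ans
-- ===== Notes on version B (the rewrite author's own statement) =====
-- stated objective: simpler
-- what changed: Replaces the defaultdict counter, the float('inf') sentinel and the nested per-distinct-value 30-character binary-string comparison with min(A), A.count(min) and a single bitwise-AND reduction over the list compared against the minimum, plus a closed form for npr(c, 2).
-- outside the precondition, e.g. on solve(3, [-1, -1, 3]): A returns 2, B returns 0
import Mathlib
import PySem

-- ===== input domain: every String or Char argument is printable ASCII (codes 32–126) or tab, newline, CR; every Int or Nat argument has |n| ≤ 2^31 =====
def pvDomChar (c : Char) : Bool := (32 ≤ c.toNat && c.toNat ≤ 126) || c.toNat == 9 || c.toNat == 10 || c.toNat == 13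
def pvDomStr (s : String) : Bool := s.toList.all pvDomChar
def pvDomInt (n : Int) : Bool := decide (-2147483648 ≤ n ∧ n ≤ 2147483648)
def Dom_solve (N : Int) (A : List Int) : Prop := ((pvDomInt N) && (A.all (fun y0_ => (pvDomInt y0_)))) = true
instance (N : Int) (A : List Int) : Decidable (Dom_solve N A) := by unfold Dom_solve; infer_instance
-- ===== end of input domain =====

-- B replaces A's dict-counter + per-distinct-value 30-char binary-string comparison with min/count
-- and a single bitwise-AND reduction over the list (objective: simpler).

-- ===== PORT A =====
def MOD : Int := 1000000007

def npr (n r : Int) : Int :=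
  (PySem.List.pyRange n (n - r) (-1)).foldl (fun res i => PySem.Int.mod (res * i) MOD) 1

-- format(v, '030b')[i] for 0 ≤ v < 2^30 (guaranteed by Pre_solve): the (29-i)-th binary digit
def bitCh (v : Int) (i : Nat) : Char := if v.toNat.testBit (29 - i) then '1' else '0'

-- ca[a] += 1 (defaultdict counter) and min_val = min(min_val, a) (none = the float('inf') sentinel)
def caStep (d : PySem.Dict Int Int) (x : Int) : PySem.Dict Int Int := d.modify x 0 (· + 1)
def minStep (o : Option Int) (x : Int) : Option Int :=
  match o with | none => some x | some m => some (min m x)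

def solve (N : Int) (A : List Int) : Int :=
  let st := A.foldl (fun st a => (caStep st.1 a, minStep st.2 a))
    ((PySem.Dict.empty : PySem.Dict Int Int), (none : Option Int))
  let ca := st.1
  match st.2 with
  | none => 0                    -- A empty: ca[float('inf')] = 0 < 2 → return 0
  | some mv =>
    if ca.getD mv 0 < 2 then 0
    else if mv ≠ 0 ∧ ∃ n ∈ ca.keys, n ≠ mv ∧ ∃ i < 30, bitCh mv i = '1' ∧ bitCh n i = '0'
    then 0                       -- the early 'return 0' inside the nested bit loops
    else
      let ans := npr (ca.getD mv 0) 2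
      (PySem.List.pyRange 2 (N - 2 + 1) 1).foldl (fun ans i => PySem.Int.mod (ans * i) MOD) ans

-- ===== PORT B =====
def solve_alt (N : Int) (A : List Int) : Int :=
  match A with
  | [] => 0
  | a :: t =>
    match PySem.List.min? (a :: t) (fun x => x) with
    | none => 0                  -- unreachable: the list is nonempty
    | some m =>
      let c : Int := PySem.List.count (a :: t) m
      if c < 2 then 0
      else
        let total := t.foldl PySem.Int.band a      -- total = A[0]; for x in A[1:]: total &= x
        if total ≠ m then 0
        else
          let ans := PySem.Int.mod (c * (c - 1)) MOD
          (PySem.List.pyRange 2 (N - 1) 1).foldl (fun ans i => PySem.Int.mod (ans * i) MOD) ans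

-- ===== PRECONDITION & SPEC =====
-- Pre_ excludes lists with an element outside [0, 2^30) (negative or too wide): the problem guarantees
-- 0 ≤ A_i < 2^30, and outside that range A's fixed-width '030b' string comparison is an implementation artefact.
def Pre_solve (N : Int) (A : List Int) : Prop := ∀ a ∈ A, 0 ≤ a ∧ a < 1073741824
instance (N : Int) (A : List Int) : Decidable (Pre_solve N A) := by unfold Pre_solve; infer_instance
def pvWitness_solve : Int × List Int := (4, [1, 1, 3, 5])

def Spec_solve (N : Int) (A : List Int) (out : Int) : Prop := out = solve_alt N A
instance (N : Int) (A : List Int) (out : Int) : Decidable (Spec_solve N A out) := by unfold Spec_solve; infer_instance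

-- ===== CLAIM (what is proved, stated in full; the proofs are below) =====
def Claim_equal_solve : Prop := ∀ (N : Int) (A : List Int), Dom_solve N A → Pre_solve N A → Spec_solve N A (solve N A)

-- ===== LEMMAS AND PROOFS =====

theorem caStep_fold (xs : List Int) :
    List.foldl caStep PySem.Dict.empty xs = PySem.Dict.counter xs := by
  rw [PySem.Dict.counter_eq_foldl]; rfl

theorem minStep_fold_some (t : List Int) (x : Int) :
    List.foldl minStep (some x) t = some (List.foldl min x t) := by
  induction t generalizing x with
  | nil => rfl
  | cons y t ih => simpa [minStep] using ih (min x y)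

theorem minStep_fold_none (x : Int) (t : List Int) :
    List.foldl minStep none (x :: t) = some (List.foldl min x t) := by
  rw [List.foldl_cons]; exact minStep_fold_some t x

theorem bitCh_eq_one (v : Int) (i : Nat) :
    bitCh v i = '1' ↔ v.toNat.testBit (29 - i) = true := by
  unfold bitCh; split <;> simp_all

theorem bitCh_eq_zero (v : Int) (i : Nat) :
    bitCh v i = '0' ↔ v.toNat.testBit (29 - i) = false := by
  unfold bitCh; split <;> simp_all

theorem pv_landbit (t : List Nat) (a i : Nat) :
    (t.foldl (· &&& ·) a).testBit i = (a.testBit i && t.all (fun y => y.testBit i)) := by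
  induction t generalizing a with
  | nil => simp
  | cons y t ih => simp [List.foldl, ih, Bool.and_assoc]

theorem pv_bandfold (t : List Int) (a : Int) (ht : ∀ x ∈ t, 0 ≤ x) (ha : 0 ≤ a) :
    t.foldl PySem.Int.band a = (((t.map Int.toNat).foldl (· &&& ·) a.toNat : Nat) : Int) := by
  induction t generalizing a with
  | nil => simp [Int.toNat_of_nonneg ha]
  | cons y t ih =>
    have hy : 0 ≤ y := ht y (by simp)
    have hb : PySem.Int.band a y = ((a.toNat &&& y.toNat : Nat) : Int) := by
      conv_lhs => rw [← Int.toNat_of_nonneg ha, ← Int.toNat_of_nonneg hy]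
      exact PySem.Int.band_natCast _ _
    simp only [List.foldl_cons, List.map_cons, hb]
    rw [ih _ (fun x hx => ht x (List.mem_cons_of_mem _ hx)) (by positivity)]
    simp

theorem pv_fold_eq_iff (a' : Nat) (t' : List Nat) (m' : Nat) (hm : m' ∈ a' :: t') :
    t'.foldl (· &&& ·) a' = m' ↔
      ∀ n ∈ a' :: t', ∀ j, m'.testBit j = true → n.testBit j = true := by
  constructor
  · intro h n hn j hj
    have hb := pv_landbit t' a' j
    rw [h, hj] at hb
    have hb' := hb.symm
    rw [Bool.and_eq_true] at hb'
    rcases List.mem_cons.mp hn with rfl | hn'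
    · exact hb'.1
    · exact List.all_eq_true.mp hb'.2 n hn'
  · intro h
    apply Nat.eq_of_testBit_eq; intro i
    rw [pv_landbit]
    cases hmi : m'.testBit i with
    | true =>
      simp only [h a' (List.mem_cons_self) i hmi, Bool.true_and]
      exact List.all_eq_true.mpr (fun n hn => h n (List.mem_cons_of_mem _ hn) i hmi)
    | false =>
      by_contra hcon
      have hone : (a'.testBit i && t'.all (fun y => y.testBit i)) = true := by
        cases hx : (a'.testBit i && t'.all (fun y => y.testBit i))
        · exact absurd hx hcon
        · rfl
      rw [Bool.and_eq_true, List.all_eq_true] at hone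
      rcases List.mem_cons.mp hm with rfl | hm'
      · rw [hone.1] at hmi; exact Bool.noConfusion hmi
      · rw [hone.2 m' hm'] at hmi; exact Bool.noConfusion hmi

theorem pv_cond (a : Int) (t : List Int) (m : Int)
    (hpre : ∀ x ∈ a :: t, 0 ≤ x ∧ x < 1073741824)
    (hmem : m ∈ a :: t) :
    List.foldl PySem.Int.band a t = m ↔
      ¬ (m ≠ 0 ∧ ∃ n, n ∈ a :: t ∧ n ≠ m ∧ ∃ i < 30, bitCh m i = '1' ∧ bitCh n i = '0') := by
  have h0 : ∀ x ∈ a :: t, 0 ≤ x := fun x hx => (hpre x hx).1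
  have ha : 0 ≤ a := h0 a (List.mem_cons_self)
  have hm0 : ((m.toNat : Int)) = m := Int.toNat_of_nonneg (h0 m hmem)
  have hm30 : m.toNat < 2 ^ 30 := by
    have := (hpre m hmem).2; omega
  rw [pv_bandfold t a (fun x hx => h0 x (List.mem_cons_of_mem _ hx)) ha]
  rw [show ((((t.map Int.toNat).foldl (· &&& ·) a.toNat : Nat) : Int) = m) ↔
      ((t.map Int.toNat).foldl (· &&& ·) a.toNat = m.toNat) from by omega]
  have hmem' : m.toNat ∈ a.toNat :: t.map Int.toNat := by
    rcases List.mem_cons.mp hmem with rfl | h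
    · exact List.mem_cons_self
    · exact List.mem_cons_of_mem _ (List.mem_map_of_mem h)
  rw [pv_fold_eq_iff _ _ _ hmem']
  constructor
  · intro h
    rintro ⟨hmne, n, hn, hne, i, hi, h1, hz⟩
    have hb1 : m.toNat.testBit (29 - i) = true := (bitCh_eq_one m i).mp h1
    have hb0 : n.toNat.testBit (29 - i) = false := (bitCh_eq_zero n i).mp hz
    have hnmem : n.toNat ∈ a.toNat :: t.map Int.toNat := by
      rcases List.mem_cons.mp hn with rfl | h'
      · exact List.mem_cons_self
      · exact List.mem_cons_of_mem _ (List.mem_map_of_mem h')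
    have := h _ hnmem (29 - i) hb1
    rw [hb0] at this; exact Bool.false_ne_true this
  · intro hnot n' hn' j hj
    by_contra hnbit
    have hjf : n'.testBit j = false := by
      cases hx : n'.testBit j
      · rfl
      · exact absurd hx hnbit
    have hj30 : j < 30 := by
      by_contra hge
      have : m.toNat < 2 ^ j :=
        lt_of_lt_of_le hm30 (Nat.pow_le_pow_right (by norm_num) (by omega))
      rw [Nat.testBit_lt_two_pow this] at hj
      exact Bool.false_ne_true hj
    obtain ⟨n, hn, rfl⟩ : ∃ n, n ∈ a :: t ∧ n.toNat = n' := by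
      rcases List.mem_cons.mp hn' with rfl | h'
      · exact ⟨a, List.mem_cons_self, rfl⟩
      · obtain ⟨n, hn, rfl⟩ := List.mem_map.mp h'
        exact ⟨n, List.mem_cons_of_mem _ hn, rfl⟩
    apply hnot
    refine ⟨?_, n, hn, ?_, 29 - j, by omega, ?_, ?_⟩
    · intro hmz
      have : m.toNat = 0 := by omega
      rw [this] at hj
      simp at hj
    · intro hnm
      rw [hnm] at hjf
      rw [hj] at hjf
      exact Bool.noConfusion hjf
    · rw [bitCh_eq_one]
      rwa [show 29 - (29 - j) = j by omega]
    · rw [bitCh_eq_zero]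
      rwa [show 29 - (29 - j) = j by omega]

theorem pv_npr_two (c : Int) (_hc : 2 ≤ c) :
    npr c 2 = PySem.Int.mod (c * (c - 1)) MOD := by
  unfold npr
  rw [PySem.List.pyRange_neg_one_cons (by omega), PySem.List.pyRange_neg_one_cons (by omega),
    PySem.List.pyRange_neg_one_eq_nil (by omega : c - 1 - 1 ≤ c - 2)]
  have hM : (0 : Int) < MOD := by unfold MOD; norm_num
  simp only [List.foldl_cons, List.foldl_nil, one_mul]
  simp only [PySem.Int.mod_eq_emod_of_pos hM]
  conv_rhs => rw [Int.mul_emod]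
  rw [Int.mul_emod, Int.emod_emod_of_dvd _ dvd_rfl]

-- ===== VERDICT (by name: the statement is the Claim_ definition above) =====
theorem solve_spec : Claim_equal_solve := by
  intro N A _ hpre
  unfold Spec_solve
  cases A with
  | nil => rfl
  | cons a t =>
    simp only [solve, solve_alt]
    rw [PySem.List.foldl_prod_mk caStep minStep (a :: t) PySem.Dict.empty none,
      caStep_fold, minStep_fold_none, PySem.List.min?_id_cons]
    set m := List.foldl min a t with hm
    simp only [PySem.Dict.getD_counter, PySem.List.count_eq, PySem.Dict.keys_counter]
    by_cases hc : ((List.count m (a :: t) : Int)) < 2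
    · simp [hc]
    · rw [if_neg hc, if_neg hc]
      have hcount : 2 ≤ List.count m (a :: t) := by omega
      have hmem : m ∈ a :: t := List.count_pos_iff.mp (by omega)
      have hcond := pv_cond a t m hpre hmem
      by_cases htot : List.foldl PySem.Int.band a t = m
      · have hA : ¬ (m ≠ 0 ∧ ∃ n, n ∈ a :: t ∧ n ≠ m ∧ ∃ i < 30, bitCh m i = '1' ∧ bitCh n i = '0') :=
          hcond.mp htot
        rw [if_neg (by simpa [PySem.Set.mem_ofList] using hA), if_neg (fun h => h htot)]
        rw [pv_npr_two _ (by exact_mod_cast hcount), show N - 2 + 1 = N - 1 from by ring]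
      · have hA : m ≠ 0 ∧ ∃ n, n ∈ a :: t ∧ n ≠ m ∧ ∃ i < 30, bitCh m i = '1' ∧ bitCh n i = '0' := by
          by_contra h; exact htot (hcond.mpr h)
        rw [if_pos (by simpa [PySem.Set.mem_ofList] using hA), if_pos htot]
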